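-- pv_equiv track=rewrite | github.com/niehusst/MOPbx | MOPbx/src/mopbx.py | _remove_dup_slashes
-- ===== SOURCE A (Python) =====
-- def _remove_dup_slashes(path):
--     """
--     Remove duplicate slashes in the given path. Mostly for
--     cleaning return values for testing function output.
--
--     path - String. a unix style path
--     @return - String. the same unix style path, but with any
--               previously repeated slashes removed.
--     """
--     new_path = []
--     prev = None
--
--     for c in path:
--         if c == prev == '/':
--             continue
--         prev = c
--         new_path.append(c)
--
--     return "".join(new_path)
-- ===== SOURCE B (Python) =====
-- import re
--
--
-- def _remove_dup_slashes(path):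
--     return re.sub(r'/+', '/', path)
-- ===== Notes on version B (the rewrite author's own statement) =====
-- stated objective: idiomatic
-- what changed: Replaced the manual char-by-char loop with prev state by a single regex substitution that collapses each maximal run of slashes at once.
import Mathlib
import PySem

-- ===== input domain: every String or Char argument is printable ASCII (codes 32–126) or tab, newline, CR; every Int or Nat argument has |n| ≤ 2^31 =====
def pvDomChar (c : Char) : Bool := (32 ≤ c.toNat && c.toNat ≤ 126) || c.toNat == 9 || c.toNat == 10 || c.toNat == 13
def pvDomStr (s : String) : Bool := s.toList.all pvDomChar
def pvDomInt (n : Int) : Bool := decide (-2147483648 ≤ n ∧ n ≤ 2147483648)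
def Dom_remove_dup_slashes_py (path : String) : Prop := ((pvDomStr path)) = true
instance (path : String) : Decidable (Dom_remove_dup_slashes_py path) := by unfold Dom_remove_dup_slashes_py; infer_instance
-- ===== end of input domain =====

-- B replaces A's char-by-char loop (with `prev` state) by a single regex substitution
-- re.sub(r'/+', '/', path): idiomatic, same O(n) cost.


-- ===== PORT A =====
-- Python A: loop over chars holding `prev`; skip a '/' when the previous kept char is '/'.
-- State = (new_path, prev); new_path.append(c) = acc ++ [c].
def remove_dup_slashes_py (path : String) : String :=
  let r := path.toList.foldl
    (fun (st : List Char × Option Char) c =>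
      if c = '/' ∧ st.2 = some '/' then st else (st.1 ++ [c], some c))
    ([], none)
  String.mk r.1

-- ===== PORT B =====
-- Port of re.sub(r'/+', '/', path): scan left to right; each maximal run of '/'
-- (one match of /+) is replaced by a single '/', other chars are copied verbatim.
def pvRegexSub : List Char → List Char
  | [] => []
  | c :: rest =>
    if c = '/' then '/' :: pvRegexSub (rest.dropWhile (· = '/'))
    else c :: pvRegexSub rest
termination_by l => l.length
decreasing_by
  · have := List.length_dropWhile_le (p := fun x => decide (x = '/')) (l := rest)
    simp; omega
  · simp

def remove_dup_slashes_py_alt (path : String) : String :=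
  String.mk (pvRegexSub path.toList)

-- ===== PRECONDITION & SPEC =====
def Spec_remove_dup_slashes_py (path : String) (out : String) : Prop := out = remove_dup_slashes_py_alt path
instance (path : String) (out : String) : Decidable (Spec_remove_dup_slashes_py path out) := by unfold Spec_remove_dup_slashes_py; infer_instance

-- ===== CLAIM (what is proved, stated in full; the proofs are below) =====
def Claim_equal_remove_dup_slashes_py : Prop := ∀ (path : String), Dom_remove_dup_slashes_py path → Spec_remove_dup_slashes_py path (remove_dup_slashes_py path)

-- ===== LEMMAS AND PROOFS =====

-- A's loop as a plain recursion (accumulator factored out).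
def goA (prev : Option Char) : List Char → List Char
  | [] => []
  | c :: rest =>
    if c = '/' ∧ prev = some '/' then goA prev rest
    else c :: goA (some c) rest

lemma foldl_eq_goA (l : List Char) : ∀ (acc : List Char) (prev : Option Char),
    (l.foldl (fun (st : List Char × Option Char) c =>
      if c = '/' ∧ st.2 = some '/' then st else (st.1 ++ [c], some c)) (acc, prev)).1
    = acc ++ goA prev l := by
  induction l with
  | nil => intro acc prev; simp [goA]
  | cons c rest ih =>
    intro acc prev
    by_cases h : c = '/' ∧ prev = some '/'
    · simp [List.foldl, h, goA, ih]
    · simp [List.foldl, h, goA, ih]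

lemma goA_eq_regexSub (l : List Char) : ∀ prev : Option Char,
    goA prev l = if prev = some '/' then pvRegexSub (l.dropWhile (· = '/')) else pvRegexSub l := by
  induction l with
  | nil => intro prev; cases prev <;> simp [goA, pvRegexSub]
  | cons c rest ih =>
    intro prev
    by_cases hp : prev = some '/'
    · subst hp
      by_cases hc : c = '/'
      · subst hc
        simp [goA, ih, List.dropWhile]
      · simp [goA, hc, ih, List.dropWhile, pvRegexSub]
    · have hcond : ¬ (c = '/' ∧ prev = some '/') := fun h => hp h.2
      by_cases hc : c = '/'
      · subst hc
        simp [goA, ih, hp, pvRegexSub]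
      · simp [goA, ih, hp, pvRegexSub, hc]

-- ===== VERDICT (by name: the statement is the Claim_ definition above) =====
theorem remove_dup_slashes_py_spec : Claim_equal_remove_dup_slashes_py := by
  intro path _
  unfold Spec_remove_dup_slashes_py remove_dup_slashes_py remove_dup_slashes_py_alt
  have h := foldl_eq_goA path.toList [] none
  simp only [h, List.nil_append, goA_eq_regexSub]
  simp
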